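-- pv_equiv track=rewrite | github.com/MarcinNieckosinski/AdventOfCode2024 | day_5/solution.py | find_rules_for_update
-- ===== SOURCE A (Python) =====
-- def find_rules_for_update(update, rules):
--     part_rules = []
--     final_rules = []
--     for i in range(len(update)):
--         for rule in rules:
--             if update[i] == rule[:2]:
--                 part_rules.append(rule)
--     for pr in part_rules:
--         if pr[3:] in update:
--             final_rules.append(pr)
--     return final_rules
-- ===== SOURCE B (Python) =====
-- def find_rules_for_update(update, rules):
--     by_first = {}
--     for rule in rules:
--         k = rule[:2]
--         by_first[k] = by_first.get(k, []) + [rule]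
--     pages = set(update)
--     final_rules = []
--     for page in update:
--         for rule in by_first.get(page, []):
--             if rule[3:] in pages:
--                 final_rules.append(rule)
--     return final_rules
-- ===== Notes on version B (the rewrite author's own statement) =====
-- stated objective: faster
-- what changed: B builds a dict indexing rules by their first-two-character prefix in one pass and a set of the update pages, then emits matching rules per update position, removing A's full rescan of rules for every position and A's linear membership scan of update for every candidate rule.
import Mathlib
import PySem

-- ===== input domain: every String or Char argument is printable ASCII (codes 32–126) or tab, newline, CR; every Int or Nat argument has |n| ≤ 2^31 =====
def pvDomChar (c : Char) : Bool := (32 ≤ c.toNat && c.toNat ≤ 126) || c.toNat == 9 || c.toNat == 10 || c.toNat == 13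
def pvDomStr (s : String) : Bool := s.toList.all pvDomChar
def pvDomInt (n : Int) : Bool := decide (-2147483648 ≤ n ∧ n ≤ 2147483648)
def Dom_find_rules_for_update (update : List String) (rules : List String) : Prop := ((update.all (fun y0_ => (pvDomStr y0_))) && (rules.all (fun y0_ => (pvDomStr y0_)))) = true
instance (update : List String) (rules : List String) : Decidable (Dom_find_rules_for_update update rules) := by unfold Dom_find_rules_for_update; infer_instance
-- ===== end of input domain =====

-- B indexes the rules by their first two characters in a dict built once and tests
-- suffix membership in a set, replacing A's rescans of `rules` and `update`;
-- alternative/faster by mechanism, return value proved identical.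

-- ===== PORT A =====
def find_rules_for_update (update : List String) (rules : List String) : List String :=
  -- part_rules loop: for i in range(len(update)): for rule in rules: if update[i] == rule[:2]
  let part_rules : List String :=
    (PySem.List.pyRange 0 (PySem.List.len update) 1).foldl (fun acc i =>
      rules.foldl (fun acc rule =>
        if PySem.List.pyGetD update i "" = PySem.Str.slice rule none (some 2) then acc ++ [rule]
        else acc) acc) []
  -- final_rules loop: for pr in part_rules: if pr[3:] in update
  part_rules.foldl (fun acc pr =>
    if PySem.Str.slice pr (some 3) none ∈ update then acc ++ [pr] else acc) []

-- ===== PORT B =====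
-- by_first[k] = by_first.get(k, []) + [rule]  is exactly Dict.modify k [] (· ++ [rule])
def find_rules_for_update_alt (update : List String) (rules : List String) : List String :=
  let by_first : PySem.Dict String (List String) :=
    rules.foldl (fun d rule =>
      d.modify (PySem.Str.slice rule none (some 2)) [] (· ++ [rule])) PySem.Dict.empty
  let pages : List String := PySem.Set.ofList update
  update.foldl (fun acc page =>
    (by_first.getD page []).foldl (fun acc rule =>
      if PySem.Str.slice rule (some 3) none ∈ pages then acc ++ [rule] else acc) acc) []

-- ===== PRECONDITION & SPEC =====
def Spec_find_rules_for_update (update : List String) (rules : List String) (out : List String) : Prop := out = find_rules_for_update_alt update rules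
instance (update : List String) (rules : List String) (out : List String) : Decidable (Spec_find_rules_for_update update rules out) := by unfold Spec_find_rules_for_update; infer_instance

-- ===== CLAIM (what is proved, stated in full; the proofs are below) =====
def Claim_equal_find_rules_for_update : Prop := ∀ (update : List String) (rules : List String), Dom_find_rules_for_update update rules → Spec_find_rules_for_update update rules (find_rules_for_update update rules)

-- ===== LEMMAS AND PROOFS =====

-- B's dict lookup returns exactly the rules whose first-two-character slice is `page`, in order.
theorem byFirst_getD (rules : List String) (page : String) :
    ((rules.foldl (fun d rule =>
        d.modify (PySem.Str.slice rule none (some 2)) [] (· ++ [rule]))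
        (PySem.Dict.empty : PySem.Dict String (List String))).getD page [])
      = rules.filter (fun r => PySem.Str.slice r none (some 2) == page) := by
  have h : rules.foldl (fun d rule =>
        d.modify (PySem.Str.slice rule none (some 2)) [] (· ++ [rule]))
        (PySem.Dict.empty : PySem.Dict String (List String))
      = (rules.map (fun r => (PySem.Str.slice r none (some 2), r))).foldl
          (fun d p => d.modify p.1 [] (· ++ [p.2])) PySem.Dict.empty := by
    rw [List.foldl_map]
  rw [h, PySem.Dict.getD_foldl_modify_append, PySem.Dict.getD_empty]
  simp [List.filter_map, Function.comp_def, List.map_map]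

-- Both programs equal the same flatMap-of-filters normal form.
theorem both_eq (update rules : List String) :
    find_rules_for_update update rules = find_rules_for_update_alt update rules := by
  unfold find_rules_for_update find_rules_for_update_alt
  simp only []
  -- A side: collapse the range loop into a loop over update itself
  rw [show (PySem.List.len update) = ((update.length : Int)) from by simp [pysem],
      PySem.List.foldl_pyRange_pyGetD' update ""
        (fun acc page => rules.foldl (fun acc rule =>
          if page = PySem.Str.slice rule none (some 2) then acc ++ [rule] else acc) acc) [] (le_refl (0:Int))]
  simp only [Int.toNat_zero, List.drop_zero]
  -- rewrite both inner loops to append-of-filter, then both outer loops to flatMap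
  rw [PySem.List.foldl_congr_mem' update
        (fun acc page => List.foldl (fun acc rule =>
          if page = PySem.Str.slice rule none (some 2) then acc ++ [rule] else acc) acc rules)
        (fun acc page => acc ++ rules.filter (fun r => decide (page = PySem.Str.slice r none (some 2)))) []
        (fun page _ acc => PySem.List.foldl_append_ite_eq_filter
          (fun r => page = PySem.Str.slice r none (some 2)) rules acc)]
  rw [PySem.List.foldl_congr_mem' update
        (fun acc page => List.foldl (fun acc rule =>
          if PySem.Str.slice rule (some 3) none ∈ (PySem.Set.ofList update : List String) then acc ++ [rule] else acc) acc
          ((rules.foldl (fun d rule =>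
              d.modify (PySem.Str.slice rule none (some 2)) [] (· ++ [rule]))
              (PySem.Dict.empty : PySem.Dict String (List String))).getD page []))
        (fun acc page => acc ++ ((rules.foldl (fun d rule =>
              d.modify (PySem.Str.slice rule none (some 2)) [] (· ++ [rule]))
              (PySem.Dict.empty : PySem.Dict String (List String))).getD page []).filter
            (fun r => decide (PySem.Str.slice r (some 3) none ∈ (PySem.Set.ofList update : List String)))) []
        (fun page _ acc => PySem.List.foldl_append_ite_eq_filter
          (fun r => PySem.Str.slice r (some 3) none ∈ (PySem.Set.ofList update : List String)) _ acc)]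
  rw [PySem.List.foldl_append_eq_flatMap, PySem.List.foldl_append_eq_flatMap,
      PySem.List.foldl_append_ite_eq_filter]
  simp only [List.nil_append, List.filter_flatMap, byFirst_getD]
  apply List.flatMap_congr
  intro page _
  simp only [List.filter_filter]
  apply List.filter_congr
  intro r _
  simp only [PySem.Set.mem_ofList, Bool.and_comm]
  congr 1
  by_cases h : page = PySem.Str.slice r none (some 2)
  · simp [h]
  · simp [h, beq_eq_false_iff_ne, Ne.symm h]

-- ===== VERDICT (by name: the statement is the Claim_ definition above) =====
theorem find_rules_for_update_spec : Claim_equal_find_rules_for_update := by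
  intro update rules _
  exact both_eq update rules
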